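-- pv_equiv track=rewrite | github.com/taro-ball/whisper-tk3000 | app.py | build_gpu_vendors_payload_value
-- ===== SOURCE A (Python) =====
-- def detect_gpu_vendor_name(gpu_name: str) -> str | None:
--     normalized = f" {' '.join(gpu_name.split()).lower()} "
--     vendor_patterns = (
--         ("NVIDIA", ("nvidia", "geforce", "quadro", "tesla")),
--         ("AMD", ("amd", "radeon", "ati")),
--         ("Intel", ("intel", "iris", "uhd", "arc")),
--         ("Qualcomm", ("qualcomm", "adreno")),
--         ("Apple", ("apple",)),
--         ("ARM", ("arm", "mali")),
--         ("Imagination", ("imagination", "powervr")),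
--         ("Microsoft", ("microsoft", "warp")),
--     )
--     for vendor_name, patterns in vendor_patterns:
--         if any(f" {pattern} " in normalized for pattern in patterns):
--             return vendor_name
--     return None
--
-- def build_gpu_vendors_payload_value(devices: list[dict[str, object]]) -> str:
--     vendor_names: list[str] = []
--     seen_vendor_names: set[str] = set()
--     for device in devices:
--         vendor_name = detect_gpu_vendor_name(str(device.get("name", "")))
--         if vendor_name and vendor_name not in seen_vendor_names:
--             seen_vendor_names.add(vendor_name)
--             vendor_names.append(vendor_name)
--     return ", ".join(vendor_names)
-- ===== SOURCE B (Python) =====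
-- _KEYWORD_VENDOR = {
--     "nvidia": "NVIDIA", "geforce": "NVIDIA", "quadro": "NVIDIA", "tesla": "NVIDIA",
--     "amd": "AMD", "radeon": "AMD", "ati": "AMD",
--     "intel": "Intel", "iris": "Intel", "uhd": "Intel", "arc": "Intel",
--     "qualcomm": "Qualcomm", "adreno": "Qualcomm",
--     "apple": "Apple",
--     "arm": "ARM", "mali": "ARM",
--     "imagination": "Imagination", "powervr": "Imagination",
--     "microsoft": "Microsoft", "warp": "Microsoft",
-- }
-- _VENDOR_PRIORITY = {"NVIDIA": 0, "AMD": 1, "Intel": 2, "Qualcomm": 3,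
--                     "Apple": 4, "ARM": 5, "Imagination": 6, "Microsoft": 7}
--
-- def _best_vendor(name):
--     # argmin over the name's tokens of the matched vendor's priority:
--     # mirrors "first vendor group listed wins" without scanning the groups.
--     best_p, best_v = len(_VENDOR_PRIORITY), None
--     for token in name.split():
--         vendor = _KEYWORD_VENDOR.get(token.lower())
--         if vendor is not None and _VENDOR_PRIORITY[vendor] < best_p:
--             best_p, best_v = _VENDOR_PRIORITY[vendor], vendor
--     return best_v
--
-- def build_gpu_vendors_payload_value(devices):
--     vendors = []
--     for device in devices:
--         vendor = _best_vendor(str(device.get("name", "")))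
--         if vendor and vendor not in vendors:
--             vendors.append(vendor)
--     return ", ".join(vendors)
-- ===== Notes on version B (the rewrite author's own statement) =====
-- stated objective: alternative
-- what changed: B inverts A's loops: instead of scanning the (vendor, patterns) groups and substring-testing each padded pattern against a normalized copy of the name with an early return, B iterates over the name's tokens, looks each lowered token up in a precomputed keyword->vendor dict, and keeps the matched vendor of minimal priority (its vendor-table position) via an explicit argmin accumulator, which reproduces A's first-listed-vendor-wins rule; the cross-device dedupe uses a plain 'not in list' test instead of a parallel seen-set.
import Mathlib
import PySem

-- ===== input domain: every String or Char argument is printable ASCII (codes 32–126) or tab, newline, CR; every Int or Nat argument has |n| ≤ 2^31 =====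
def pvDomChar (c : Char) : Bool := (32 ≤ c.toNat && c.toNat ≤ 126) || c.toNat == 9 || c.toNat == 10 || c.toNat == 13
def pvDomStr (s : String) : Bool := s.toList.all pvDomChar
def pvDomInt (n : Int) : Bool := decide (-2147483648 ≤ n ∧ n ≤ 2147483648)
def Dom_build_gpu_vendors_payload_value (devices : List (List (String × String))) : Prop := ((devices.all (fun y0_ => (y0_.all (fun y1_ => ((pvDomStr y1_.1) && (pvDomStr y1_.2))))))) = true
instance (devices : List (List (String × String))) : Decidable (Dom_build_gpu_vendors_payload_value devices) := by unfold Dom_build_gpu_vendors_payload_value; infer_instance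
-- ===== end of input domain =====

-- B inverts A's loops: it walks the name's tokens, looks each lowered token up in a precomputed
-- keyword->vendor dict, and keeps the matched vendor of minimal table priority (argmin accumulator),
-- instead of A's padded-substring scan over the (vendor, patterns) groups with early return
-- (alternative decomposition; return value proved identical on the whole domain).

-- ===== PORT A =====
def pvVendorPatterns : List (String × List String) :=
  [("NVIDIA", ["nvidia", "geforce", "quadro", "tesla"]),
   ("AMD", ["amd", "radeon", "ati"]),
   ("Intel", ["intel", "iris", "uhd", "arc"]),
   ("Qualcomm", ["qualcomm", "adreno"]),
   ("Apple", ["apple"]),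
   ("ARM", ["arm", "mali"]),
   ("Imagination", ["imagination", "powervr"]),
   ("Microsoft", ["microsoft", "warp"])]

def detect_gpu_vendor_name (gpu_name : String) : Option String :=
  let normalized := " " ++ PySem.Str.lower (PySem.Str.join " " (PySem.Str.split₀ gpu_name)) ++ " "
  pvVendorPatterns.findSome? (fun vp =>
    if vp.2.any (fun pattern => PySem.Str.isIn (" " ++ pattern ++ " ") normalized) then some vp.1 else none)

def build_gpu_vendors_payload_value (devices : List (List (String × String))) : String :=
  let st := devices.foldl (fun (st : List String × PySem.Set String) device =>
    match detect_gpu_vendor_name (PySem.Dict.getD (PySem.Dict.mk device) "name" "") with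
    | some v => if v ≠ "" ∧ PySem.Set.contains st.2 v = false then (st.1 ++ [v], PySem.Set.add st.2 v) else st
    | none => st) ([], PySem.Set.empty)
  PySem.Str.join ", " st.1

-- ===== PORT B =====
def pvKwPairs : List (String × String) :=
  [("nvidia", "NVIDIA"), ("geforce", "NVIDIA"), ("quadro", "NVIDIA"), ("tesla", "NVIDIA"),
   ("amd", "AMD"), ("radeon", "AMD"), ("ati", "AMD"),
   ("intel", "Intel"), ("iris", "Intel"), ("uhd", "Intel"), ("arc", "Intel"),
   ("qualcomm", "Qualcomm"), ("adreno", "Qualcomm"),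
   ("apple", "Apple"),
   ("arm", "ARM"), ("mali", "ARM"),
   ("imagination", "Imagination"), ("powervr", "Imagination"),
   ("microsoft", "Microsoft"), ("warp", "Microsoft")]

def pvKeywordVendor : PySem.Dict String String := PySem.Dict.mk pvKwPairs

def pvVendorPriority : PySem.Dict String Int :=
  PySem.Dict.mk [("NVIDIA", 0), ("AMD", 1), ("Intel", 2), ("Qualcomm", 3),
                 ("Apple", 4), ("ARM", 5), ("Imagination", 6), ("Microsoft", 7)]

-- the loop body of _best_vendor: lookup of the (already lowered) token, strict argmin update
-- (_VENDOR_PRIORITY[vendor] is a plain lookup in Python; it always hits since every dict value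
--  is a priority key, so getD's default is never used)
def pvBestStep (st : Int × Option String) (tok : String) : Int × Option String :=
  match PySem.Dict.get? pvKeywordVendor tok with
  | some vendor =>
      if PySem.Dict.getD pvVendorPriority vendor 8 < st.1
      then (PySem.Dict.getD pvVendorPriority vendor 8, some vendor) else st
  | none => st

def pvBestVendor (name : String) : Option String :=
  let st := (PySem.Str.split₀ name).foldl
    (fun st token => pvBestStep st (PySem.Str.lower token))
    ((PySem.Dict.size pvVendorPriority : Int), none)
  st.2

def build_gpu_vendors_payload_value_alt (devices : List (List (String × String))) : String :=
  let vendors := devices.foldl (fun (vendors : List String) device =>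
    match pvBestVendor (PySem.Dict.getD (PySem.Dict.mk device) "name" "") with
    | some v => if v ≠ "" ∧ vendors.contains v = false then vendors ++ [v] else vendors
    | none => vendors) []
  PySem.Str.join ", " vendors

-- ===== PRECONDITION & SPEC =====
def Spec_build_gpu_vendors_payload_value (devices : List (List (String × String))) (out : String) : Prop := out = build_gpu_vendors_payload_value_alt devices
instance (devices : List (List (String × String))) (out : String) : Decidable (Spec_build_gpu_vendors_payload_value devices out) := by unfold Spec_build_gpu_vendors_payload_value; infer_instance

-- ===== CLAIM (what is proved, stated in full; the proofs are below) =====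
def Claim_equal_build_gpu_vendors_payload_value : Prop := ∀ (devices : List (List (String × String))), Dom_build_gpu_vendors_payload_value devices → Spec_build_gpu_vendors_payload_value devices (build_gpu_vendors_payload_value devices)

-- ===== LEMMAS AND PROOFS =====

-- ---- A-side: the padded-substring test on the normalized name = token membership ----

-- intercalate with a single-space separator, cons-cons step
lemma pv_intercalate_cons_cons (x y : List Char) (l : List (List Char)) :
    List.intercalate [' '] (x :: y :: l) = x ++ ' ' :: List.intercalate [' '] (y :: l) := by
  simp [List.intercalate, List.intersperse]

-- lower commutes with the space-join (lowerChar fixes ' ')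
lemma pv_lower_intercalate (ts : List (List Char)) :
    PySem.Chars.lower (List.intercalate [' '] ts) = List.intercalate [' '] (ts.map PySem.Chars.lower) := by
  induction ts with
  | nil => simp [List.intercalate, PySem.Chars.lower]
  | cons x l ih =>
    cases l with
    | nil => simp [List.intercalate, PySem.Chars.lower]
    | cons y l' =>
      have h32 : PySem.Chars.lowerChar ' ' = ' ' := by decide
      rw [pv_intercalate_cons_cons, List.map_cons, List.map_cons, pv_intercalate_cons_cons]
      simp only [PySem.Chars.lower] at ih ⊢
      simp [ih, h32]
      simp [PySem.Chars.lower]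

-- joined words followed by one more space = flat word-space blocks (nonempty case)
lemma pv_intercalate_flat (ts : List (List Char)) (h : ts ≠ []) :
    List.intercalate [' '] ts ++ [' '] = ts.flatMap (fun t => t ++ [' ']) := by
  induction ts with
  | nil => exact absurd rfl h
  | cons x l ih =>
    cases l with
    | nil => simp [List.intercalate]
    | cons y l' =>
      rw [pv_intercalate_cons_cons, List.flatMap_cons, ← ih (by simp)]
      simp

-- a space-free word followed by ' ' is a prefix of (space-free word ++ ' ' :: r) only for the word itself
lemma pv_prefix_eq (p t r : List Char) (hp : ' ' ∉ p) (ht : ' ' ∉ t)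
    (h : (p ++ [' ']) <+: (t ++ ' ' :: r)) : p = t := by
  induction p generalizing t with
  | nil =>
    cases t with
    | nil => rfl
    | cons c t' =>
      simp only [List.nil_append, List.cons_append, List.cons_prefix_cons] at h
      obtain ⟨h1, -⟩ := h
      subst h1
      simp at ht
  | cons a p' ih =>
    cases t with
    | nil =>
      simp only [List.cons_append, List.nil_append, List.cons_prefix_cons] at h
      obtain ⟨h1, -⟩ := h
      subst h1
      simp at hp
    | cons c t' =>
      simp only [List.cons_append, List.cons_prefix_cons] at h
      have := ih (fun hm => hp (List.mem_cons_of_mem _ hm)) (t := t')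
        (fun hm => ht (List.mem_cons_of_mem _ hm)) h.2
      rw [h.1, this]

-- an occurrence of a space-headed pattern cannot start inside a space-free word
lemma pv_infix_skip (x t r : List Char) (ht : ' ' ∉ t)
    (h : (' ' :: x) <:+: (t ++ r)) : (' ' :: x) <:+: r := by
  induction t with
  | nil => simpa using h
  | cons c t' ih =>
    rw [List.cons_append, List.infix_cons_iff] at h
    rcases h with h | h
    · rw [List.cons_prefix_cons] at h
      obtain ⟨h1, -⟩ := h
      subst h1
      simp at ht
    · exact ih (fun hm => ht (List.mem_cons_of_mem _ hm)) h

-- CORE: " p " occurs in the padded join iff p is one of the words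
lemma pv_infix_iff (p : List Char) (ts : List (List Char)) (hp : p ≠ []) (hps : ' ' ∉ p)
    (hts : ∀ t ∈ ts, t ≠ [] ∧ ' ' ∉ t) :
    ((' ' :: (p ++ [' '])) <:+: (' ' :: ts.flatMap (fun t => t ++ [' ']))) ↔ p ∈ ts := by
  induction ts with
  | nil =>
    simp only [List.flatMap_nil, List.not_mem_nil, iff_false]
    intro h
    have hle := h.length_le
    have hlen : 1 ≤ p.length := List.length_pos_iff.mpr hp
    simp only [List.length_cons, List.length_append, List.length_nil] at hle
    omega
  | cons t ts' ih =>
    have hshape : (' ' :: (t :: ts').flatMap (fun t => t ++ [' ']))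
        = ' ' :: (t ++ ' ' :: ts'.flatMap (fun t => t ++ [' '])) := by simp
    rw [hshape]
    constructor
    · intro h
      rw [List.infix_cons_iff] at h
      rcases h with h | h
      · rw [List.cons_prefix_cons] at h
        have := pv_prefix_eq p t _ hps (hts t List.mem_cons_self).2 h.2
        exact this ▸ List.mem_cons_self
      · have := pv_infix_skip _ t _ (hts t List.mem_cons_self).2 h
        exact List.mem_cons_of_mem _ ((ih (fun u hu => hts u (List.mem_cons_of_mem _ hu))).mp this)
    · intro h
      rcases List.mem_cons.mp h with h | h
      · subst h
        exact List.IsPrefix.isInfix ⟨ts'.flatMap (fun t => t ++ [' ']), by simp⟩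
      · have h1 := (ih (fun u hu => hts u (List.mem_cons_of_mem _ hu))).mpr h
        exact h1.trans (List.IsSuffix.isInfix ⟨' ' :: t, by simp⟩)

-- split() produces nonempty, whitespace-free words
lemma pv_split₀_go_ok (s cur : List Char) (acc : List (List Char))
    (hcur : ∀ c ∈ cur, PySem.Chars.isspace c = false)
    (hacc : ∀ t ∈ acc, t ≠ [] ∧ ∀ c ∈ t, PySem.Chars.isspace c = false) :
    ∀ t ∈ PySem.Chars.split₀.go s cur acc, t ≠ [] ∧ ∀ c ∈ t, PySem.Chars.isspace c = false := by
  induction s generalizing cur acc with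
  | nil =>
    intro t ht
    unfold PySem.Chars.split₀.go at ht
    by_cases hemp : cur.isEmpty = true
    · rw [if_pos hemp] at ht
      exact hacc t (List.mem_reverse.mp ht)
    · rw [if_neg hemp] at ht
      rcases List.mem_cons.mp (List.mem_reverse.mp ht) with h | h
      · subst h
        constructor
        · simp only [ne_eq, List.reverse_eq_nil_iff]
          simpa [List.isEmpty_iff] using hemp
        · intro c hc
          exact hcur c (List.mem_reverse.mp hc)
      · exact hacc t h
  | cons c rest ih =>
    intro t ht
    unfold PySem.Chars.split₀.go at ht
    by_cases hsp : PySem.Chars.isspace c = true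
    · rw [if_pos hsp] at ht
      by_cases hemp : cur.isEmpty = true
      · rw [if_pos hemp] at ht
        exact ih [] acc (by simp) hacc t ht
      · rw [if_neg hemp] at ht
        refine ih [] (cur.reverse :: acc) (by simp) ?_ t ht
        intro u hu
        rcases List.mem_cons.mp hu with h | h
        · subst h
          constructor
          · simp only [ne_eq, List.reverse_eq_nil_iff]
            simpa [List.isEmpty_iff] using hemp
          · intro d hd
            exact hcur d (List.mem_reverse.mp hd)
        · exact hacc u h
    · rw [if_neg hsp] at ht
      refine ih (c :: cur) acc ?_ hacc t ht
      intro d hd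
      rcases List.mem_cons.mp hd with h | h
      · subst h
        exact eq_false_of_ne_true hsp
      · exact hcur d h

lemma pv_split₀_ok (s : List Char) :
    ∀ t ∈ PySem.Chars.split₀ s, t ≠ [] ∧ ∀ c ∈ t, PySem.Chars.isspace c = false := by
  rw [PySem.Chars.split₀]
  exact pv_split₀_go_ok s [] [] (by simp) (by simp)

-- lowering preserves "no space" and "nonempty"
lemma pv_lower_ok (t : List Char) (h1 : t ≠ []) (h2 : ∀ c ∈ t, PySem.Chars.isspace c = false) :
    PySem.Chars.lower t ≠ [] ∧ ' ' ∉ PySem.Chars.lower t := by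
  constructor
  · simpa [PySem.Chars.lower] using h1
  · intro hmem
    rcases List.mem_map.mp hmem with ⟨c, hc, hlc⟩
    have hns := h2 c hc
    by_cases hu : PySem.Chars.isupper c = true
    · have hrange : 65 ≤ c.toNat ∧ c.toNat ≤ 90 := by
        simpa [PySem.Chars.isupper, Char.le_def] using hu
      have hv : (c.toNat + 32).isValidChar := by
        left
        omega
      have htn : (Char.ofNat (c.toNat + 32)).toNat = c.toNat + 32 := by simp [Char.ofNat, hv]
      rw [PySem.Chars.lowerChar, if_pos hu] at hlc
      have h32 : (' ' : Char).toNat = 32 := by decide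
      rw [← hlc, htn] at h32
      omega
    · rw [PySem.Chars.lowerChar, if_neg hu] at hlc
      subst hlc
      simp [PySem.Chars.isspace] at hns

-- A's substring test on the normalized name = token membership
lemma pv_isIn_token (p : String) (hp : p.toList ≠ []) (hps : ' ' ∉ p.toList) (name : String) :
    PySem.Str.isIn (" " ++ p ++ " ")
      (" " ++ PySem.Str.lower (PySem.Str.join " " (PySem.Str.split₀ name)) ++ " ")
    = ((PySem.Str.split₀ name).map PySem.Str.lower).contains p := by
  rw [Bool.eq_iff_iff, PySem.Str.isIn_iff_infix, List.contains_iff_mem]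
  have hsub : (" " ++ p ++ " ").toList = ' ' :: (p.toList ++ [' ']) := by
    have h1 : (" " : String).toList = [' '] := by decide
    simp [String.toList_append, h1]
  have hbig : (" " ++ PySem.Str.lower (PySem.Str.join " " (PySem.Str.split₀ name)) ++ " ").toList
      = ' ' :: (List.intercalate [' '] (((PySem.Str.split₀ name).map String.toList).map PySem.Chars.lower) ++ [' ']) := by
    have h1 : (" " : String).toList = [' '] := by decide
    simp [String.toList_append, h1, PySem.Str.toList_lower, PySem.Str.toList_join, PySem.Chars.join]
    rw [pv_lower_intercalate]
  rw [hsub, hbig]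
  by_cases hnil : PySem.Str.split₀ name = []
  · rw [hnil]
    simp only [List.map_nil]
    rw [show List.intercalate [' '] ([] : List (List Char)) = [] from by simp [List.intercalate]]
    simp only [List.nil_append, List.not_mem_nil, iff_false]
    intro h
    have hle := h.length_le
    have hlen : 1 ≤ p.toList.length := List.length_pos_iff.mpr hp
    simp only [List.length_cons, List.length_append, List.length_nil] at hle
    omega
  · have hne : ((PySem.Str.split₀ name).map String.toList).map PySem.Chars.lower ≠ [] := by
      simp only [ne_eq, List.map_eq_nil_iff]
      exact hnil
    rw [pv_intercalate_flat _ hne]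
    have hts : ∀ t ∈ ((PySem.Str.split₀ name).map String.toList).map PySem.Chars.lower,
        t ≠ [] ∧ ' ' ∉ t := by
      intro t ht
      rcases List.mem_map.mp ht with ⟨u, hu, he⟩
      rcases List.mem_map.mp hu with ⟨w, hw, hew⟩
      have hok : u ≠ [] ∧ ∀ c ∈ u, PySem.Chars.isspace c = false := by
        have hmem : u ∈ List.map String.toList (PySem.Str.split₀ name) := by
          rw [← hew]
          exact List.mem_map_of_mem hw
        rw [PySem.Str.split₀_map_toList] at hmem
        exact pv_split₀_ok name.toList u hmem
      exact he ▸ pv_lower_ok u hok.1 hok.2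
    rw [pv_infix_iff p.toList _ hp hps hts]
    rw [show ((PySem.Str.split₀ name).map String.toList).map PySem.Chars.lower
        = ((PySem.Str.split₀ name).map PySem.Str.lower).map String.toList from by
      rw [List.map_map, List.map_map]
      exact List.map_congr_left (fun w _ => by simp [PySem.Str.toList_lower])]
    constructor
    · intro h
      rcases List.mem_map.mp h with ⟨q, hq, he⟩
      rwa [String.toList_inj.mp he] at hq
    · intro h
      exact List.mem_map_of_mem h

lemma pv_findSome?_congr {α β : Type} (l : List α) (f g : α → Option β)
    (h : ∀ x ∈ l, f x = g x) : l.findSome? f = l.findSome? g := by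
  induction l with
  | nil => rfl
  | cons x l' ih =>
    rw [List.findSome?_cons, List.findSome?_cons, h x List.mem_cons_self,
      ih (fun y hy => h y (List.mem_cons_of_mem _ hy))]

lemma pv_any_mem_congr {α : Type} (l : List α) (p q : α → Bool)
    (h : ∀ x ∈ l, p x = q x) : l.any p = l.any q := by
  induction l with
  | nil => rfl
  | cons a l ih =>
    simp only [List.any_cons, h a List.mem_cons_self,
      ih (fun x hx => h x (List.mem_cons_of_mem _ hx))]

-- ---- the priority index of a token: its vendor group's position, 8 if none ----

def pvIdxSpec (s : String) : Int :=
  if s ∈ (["nvidia", "geforce", "quadro", "tesla"] : List String) then 0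
  else if s ∈ (["amd", "radeon", "ati"] : List String) then 1
  else if s ∈ (["intel", "iris", "uhd", "arc"] : List String) then 2
  else if s ∈ (["qualcomm", "adreno"] : List String) then 3
  else if s ∈ (["apple"] : List String) then 4
  else if s ∈ (["arm", "mali"] : List String) then 5
  else if s ∈ (["imagination", "powervr"] : List String) then 6
  else if s ∈ (["microsoft", "warp"] : List String) then 7
  else 8

def pvVendAt (k : Int) : Option String :=
  if k = 0 then some "NVIDIA" else if k = 1 then some "AMD" else if k = 2 then some "Intel"
  else if k = 3 then some "Qualcomm" else if k = 4 then some "Apple" else if k = 5 then some "ARM"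
  else if k = 6 then some "Imagination" else if k = 7 then some "Microsoft" else none

lemma pv_idxSpec_range (s : String) : 0 ≤ pvIdxSpec s ∧ pvIdxSpec s ≤ 8 := by
  unfold pvIdxSpec
  split_ifs <;> omega

-- dict lookup characterized by the pair list
lemma pv_get?_iff (s v : String) :
    PySem.Dict.get? pvKeywordVendor s = some v ↔ (s, v) ∈ pvKwPairs := by
  have hnd : pvKeywordVendor.keys.Nodup := by decide
  have h := PySem.Dict.get?_eq_some_iff_mem_items (d := pvKeywordVendor) (k := s) (v := v) hnd
  exact h

lemma pv_idx_none (s : String) (h : PySem.Dict.get? pvKeywordVendor s = none) :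
    pvIdxSpec s = 8 := by
  unfold pvIdxSpec
  split_ifs with h0 h1 h2 h3 h4 h5 h6 h7
  · exact absurd h (by fin_cases h0 <;> decide)
  · exact absurd h (by fin_cases h1 <;> decide)
  · exact absurd h (by fin_cases h2 <;> decide)
  · exact absurd h (by fin_cases h3 <;> decide)
  · exact absurd h (by fin_cases h4 <;> decide)
  · exact absurd h (by fin_cases h5 <;> decide)
  · exact absurd h (by fin_cases h6 <;> decide)
  · exact absurd h (by fin_cases h7 <;> decide)
  · rfl

lemma pv_idx_some (s v : String) (h : PySem.Dict.get? pvKeywordVendor s = some v) :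
    PySem.Dict.getD pvVendorPriority v 8 = pvIdxSpec s ∧ pvVendAt (pvIdxSpec s) = some v := by
  have hm := (pv_get?_iff s v).mp h
  fin_cases hm <;> exact ⟨by decide, by decide⟩

-- group membership = priority index
lemma pv_mem_idx0 (s : String) : s ∈ (["nvidia", "geforce", "quadro", "tesla"] : List String) ↔ pvIdxSpec s = 0 := by
  constructor
  · intro h; fin_cases h <;> decide
  · intro h; unfold pvIdxSpec at h; split_ifs at h <;> first | assumption | omega

lemma pv_mem_idx1 (s : String) : s ∈ (["amd", "radeon", "ati"] : List String) ↔ pvIdxSpec s = 1 := by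
  constructor
  · intro h; fin_cases h <;> decide
  · intro h; unfold pvIdxSpec at h; split_ifs at h <;> first | assumption | omega

lemma pv_mem_idx2 (s : String) : s ∈ (["intel", "iris", "uhd", "arc"] : List String) ↔ pvIdxSpec s = 2 := by
  constructor
  · intro h; fin_cases h <;> decide
  · intro h; unfold pvIdxSpec at h; split_ifs at h <;> first | assumption | omega

lemma pv_mem_idx3 (s : String) : s ∈ (["qualcomm", "adreno"] : List String) ↔ pvIdxSpec s = 3 := by
  constructor
  · intro h; fin_cases h <;> decide
  · intro h; unfold pvIdxSpec at h; split_ifs at h <;> first | assumption | omega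

lemma pv_mem_idx4 (s : String) : s ∈ (["apple"] : List String) ↔ pvIdxSpec s = 4 := by
  constructor
  · intro h; fin_cases h <;> decide
  · intro h; unfold pvIdxSpec at h; split_ifs at h <;> first | assumption | omega

lemma pv_mem_idx5 (s : String) : s ∈ (["arm", "mali"] : List String) ↔ pvIdxSpec s = 5 := by
  constructor
  · intro h; fin_cases h <;> decide
  · intro h; unfold pvIdxSpec at h; split_ifs at h <;> first | assumption | omega

lemma pv_mem_idx6 (s : String) : s ∈ (["imagination", "powervr"] : List String) ↔ pvIdxSpec s = 6 := by
  constructor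
  · intro h; fin_cases h <;> decide
  · intro h; unfold pvIdxSpec at h; split_ifs at h <;> first | assumption | omega

lemma pv_mem_idx7 (s : String) : s ∈ (["microsoft", "warp"] : List String) ↔ pvIdxSpec s = 7 := by
  constructor
  · intro h; fin_cases h <;> decide
  · intro h; unfold pvIdxSpec at h; split_ifs at h <;> first | assumption | omega

-- swap the two 'any's of a common-element test
lemma pv_any_swap (kws ls : List String) :
    kws.any (fun q => ls.contains q) = ls.any (fun s => kws.contains s) := by
  rw [Bool.eq_iff_iff]
  simp only [List.any_eq_true, List.contains_iff_mem]
  exact ⟨fun ⟨a, h1, h2⟩ => ⟨a, h2, h1⟩, fun ⟨a, h1, h2⟩ => ⟨a, h2, h1⟩⟩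

-- ---- B-side: the argmin fold computes the minimal priority index and its vendor ----

lemma pv_beststep_eq (s : String) (p : Int) (hp8 : p ≤ 8) :
    pvBestStep (p, pvVendAt p) s = (min (pvIdxSpec s) p, pvVendAt (min (pvIdxSpec s) p)) := by
  unfold pvBestStep
  cases hg : PySem.Dict.get? pvKeywordVendor s with
  | none =>
    have h8 := pv_idx_none s hg
    rw [h8, min_eq_right hp8]
  | some v =>
    obtain ⟨hq, hv⟩ := pv_idx_some s v hg
    dsimp only
    rw [hq]
    by_cases hlt : pvIdxSpec s < p
    · rw [if_pos hlt, min_eq_left (le_of_lt hlt), hv]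
    · rw [if_neg hlt, min_eq_right (le_of_not_gt hlt)]

lemma pv_fold_best (ls : List String) (p : Int) (hp0 : 0 ≤ p) (hp8 : p ≤ 8) :
    ls.foldl pvBestStep (p, pvVendAt p)
    = (ls.foldl (fun a s => min (pvIdxSpec s) a) p,
       pvVendAt (ls.foldl (fun a s => min (pvIdxSpec s) a) p)) := by
  induction ls generalizing p with
  | nil => rfl
  | cons s l ih =>
    rw [List.foldl_cons, List.foldl_cons, pv_beststep_eq s p hp8]
    have hr := pv_idxSpec_range s
    exact ih (min (pvIdxSpec s) p) (by omega) (by omega)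

-- min-fold facts
lemma pv_minfold_le_init (ls : List String) (a : Int) :
    ls.foldl (fun a s => min (pvIdxSpec s) a) a ≤ a := by
  induction ls generalizing a with
  | nil => exact le_refl a
  | cons s l ih =>
    rw [List.foldl_cons]
    exact le_trans (ih (min (pvIdxSpec s) a)) (min_le_right _ _)

lemma pv_minfold_le_mem (ls : List String) (a : Int) :
    ∀ s ∈ ls, ls.foldl (fun a s => min (pvIdxSpec s) a) a ≤ pvIdxSpec s := by
  induction ls generalizing a with
  | nil => intro s hs; exact absurd hs (List.not_mem_nil)
  | cons t l ih =>
    intro s hs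
    rw [List.foldl_cons]
    rcases List.mem_cons.mp hs with h | h
    · subst h
      exact le_trans (pv_minfold_le_init l _) (min_le_left _ _)
    · exact ih _ s h

lemma pv_minfold_init_or_mem (ls : List String) (a : Int) :
    ls.foldl (fun a s => min (pvIdxSpec s) a) a = a
    ∨ ∃ s ∈ ls, ls.foldl (fun a s => min (pvIdxSpec s) a) a = pvIdxSpec s := by
  induction ls generalizing a with
  | nil => exact Or.inl rfl
  | cons t l ih =>
    rw [List.foldl_cons]
    rcases ih (min (pvIdxSpec t) a) with h | ⟨s, hs, h⟩
    · rcases min_cases (pvIdxSpec t) a with ⟨hm, -⟩ | ⟨hm, -⟩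
      · exact Or.inr ⟨t, List.mem_cons_self, by rw [h, hm]⟩
      · exact Or.inl (by rw [h, hm])
    · exact Or.inr ⟨s, List.mem_cons_of_mem _ hs, h⟩

-- the first-group-with-a-matching-token chain
def pvChain (ls : List String) : Option String :=
  if ls.any (fun s => pvIdxSpec s == 0) then some "NVIDIA"
  else if ls.any (fun s => pvIdxSpec s == 1) then some "AMD"
  else if ls.any (fun s => pvIdxSpec s == 2) then some "Intel"
  else if ls.any (fun s => pvIdxSpec s == 3) then some "Qualcomm"
  else if ls.any (fun s => pvIdxSpec s == 4) then some "Apple"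
  else if ls.any (fun s => pvIdxSpec s == 5) then some "ARM"
  else if ls.any (fun s => pvIdxSpec s == 6) then some "Imagination"
  else if ls.any (fun s => pvIdxSpec s == 7) then some "Microsoft"
  else none

-- A's group scan, with conditions reduced to token membership, = the chain
lemma pv_chainA (ls : List String) :
    pvVendorPatterns.findSome? (fun vp => if vp.2.any (fun q => ls.contains q) then some vp.1 else none)
    = pvChain ls := by
  have c0 : (["nvidia", "geforce", "quadro", "tesla"] : List String).any (fun q => ls.contains q)
      = ls.any (fun s => pvIdxSpec s == 0) := by
    rw [pv_any_swap]
    exact pv_any_mem_congr _ _ _ (fun s _ => by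
      rw [Bool.eq_iff_iff]
      simp only [List.contains_iff_mem, beq_iff_eq]
      exact pv_mem_idx0 s)
  have c1 : (["amd", "radeon", "ati"] : List String).any (fun q => ls.contains q)
      = ls.any (fun s => pvIdxSpec s == 1) := by
    rw [pv_any_swap]
    exact pv_any_mem_congr _ _ _ (fun s _ => by
      rw [Bool.eq_iff_iff]
      simp only [List.contains_iff_mem, beq_iff_eq]
      exact pv_mem_idx1 s)
  have c2 : (["intel", "iris", "uhd", "arc"] : List String).any (fun q => ls.contains q)
      = ls.any (fun s => pvIdxSpec s == 2) := by
    rw [pv_any_swap]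
    exact pv_any_mem_congr _ _ _ (fun s _ => by
      rw [Bool.eq_iff_iff]
      simp only [List.contains_iff_mem, beq_iff_eq]
      exact pv_mem_idx2 s)
  have c3 : (["qualcomm", "adreno"] : List String).any (fun q => ls.contains q)
      = ls.any (fun s => pvIdxSpec s == 3) := by
    rw [pv_any_swap]
    exact pv_any_mem_congr _ _ _ (fun s _ => by
      rw [Bool.eq_iff_iff]
      simp only [List.contains_iff_mem, beq_iff_eq]
      exact pv_mem_idx3 s)
  have c4 : (["apple"] : List String).any (fun q => ls.contains q)
      = ls.any (fun s => pvIdxSpec s == 4) := by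
    rw [pv_any_swap]
    exact pv_any_mem_congr _ _ _ (fun s _ => by
      rw [Bool.eq_iff_iff]
      simp only [List.contains_iff_mem, beq_iff_eq]
      exact pv_mem_idx4 s)
  have c5 : (["arm", "mali"] : List String).any (fun q => ls.contains q)
      = ls.any (fun s => pvIdxSpec s == 5) := by
    rw [pv_any_swap]
    exact pv_any_mem_congr _ _ _ (fun s _ => by
      rw [Bool.eq_iff_iff]
      simp only [List.contains_iff_mem, beq_iff_eq]
      exact pv_mem_idx5 s)
  have c6 : (["imagination", "powervr"] : List String).any (fun q => ls.contains q)
      = ls.any (fun s => pvIdxSpec s == 6) := by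
    rw [pv_any_swap]
    exact pv_any_mem_congr _ _ _ (fun s _ => by
      rw [Bool.eq_iff_iff]
      simp only [List.contains_iff_mem, beq_iff_eq]
      exact pv_mem_idx6 s)
  have c7 : (["microsoft", "warp"] : List String).any (fun q => ls.contains q)
      = ls.any (fun s => pvIdxSpec s == 7) := by
    rw [pv_any_swap]
    exact pv_any_mem_congr _ _ _ (fun s _ => by
      rw [Bool.eq_iff_iff]
      simp only [List.contains_iff_mem, beq_iff_eq]
      exact pv_mem_idx7 s)
  unfold pvVendorPatterns pvChain
  simp only [List.findSome?_cons, List.findSome?_nil]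
  rw [c0, c1, c2, c3, c4, c5, c6, c7]
  by_cases h0 : ls.any (fun s => pvIdxSpec s == 0) <;>
  by_cases h1 : ls.any (fun s => pvIdxSpec s == 1) <;>
  by_cases h2 : ls.any (fun s => pvIdxSpec s == 2) <;>
  by_cases h3 : ls.any (fun s => pvIdxSpec s == 3) <;>
  by_cases h4 : ls.any (fun s => pvIdxSpec s == 4) <;>
  by_cases h5 : ls.any (fun s => pvIdxSpec s == 5) <;>
  by_cases h6 : ls.any (fun s => pvIdxSpec s == 6) <;>
  by_cases h7 : ls.any (fun s => pvIdxSpec s == 7) <;>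
  simp [h0, h1, h2, h3, h4, h5, h6, h7]

-- the argmin over the tokens = the chain
lemma pv_min_chain (ls : List String) :
    pvVendAt (ls.foldl (fun a s => min (pvIdxSpec s) a) 8) = pvChain ls := by
  set m := ls.foldl (fun a s => min (pvIdxSpec s) a) 8 with hm
  have hm8 : m ≤ 8 := pv_minfold_le_init ls 8
  have hm0 : 0 ≤ m := by
    rcases pv_minfold_init_or_mem ls 8 with h | ⟨s, -, h⟩
    · omega
    · have := pv_idxSpec_range s; omega
  have hwit : ∀ (k : Int), ls.any (fun s => pvIdxSpec s == k) = true → m ≤ k := by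
    intro k hk
    rcases List.any_eq_true.mp hk with ⟨s, hs, he⟩
    have := pv_minfold_le_mem ls 8 s hs
    have := beq_iff_eq.mp he
    omega
  have hno : ∀ (k : Int), ls.any (fun s => pvIdxSpec s == k) = false → m ≠ k ∨ m = 8 := by
    intro k hk
    rcases pv_minfold_init_or_mem ls 8 with h | ⟨s, hs, h⟩
    · exact Or.inr h
    · left
      intro hmk
      have : pvIdxSpec s == k := beq_iff_eq.mpr (by omega)
      have : ls.any (fun s => pvIdxSpec s == k) = true := List.any_eq_true.mpr ⟨s, hs, this⟩
      rw [this] at hk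
      simp at hk
  unfold pvChain
  by_cases h0 : ls.any (fun s => pvIdxSpec s == 0)
  · have := hwit 0 h0
    rw [if_pos h0, show m = 0 by omega]
    rfl
  rw [if_neg h0]
  have n0 := hno 0 (Bool.eq_false_iff.mpr h0)
  by_cases h1 : ls.any (fun s => pvIdxSpec s == 1)
  · have := hwit 1 h1
    rw [if_pos h1, show m = 1 by omega]
    rfl
  rw [if_neg h1]
  have n1 := hno 1 (Bool.eq_false_iff.mpr h1)
  by_cases h2 : ls.any (fun s => pvIdxSpec s == 2)
  · have := hwit 2 h2
    rw [if_pos h2, show m = 2 by omega]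
    rfl
  rw [if_neg h2]
  have n2 := hno 2 (Bool.eq_false_iff.mpr h2)
  by_cases h3 : ls.any (fun s => pvIdxSpec s == 3)
  · have := hwit 3 h3
    rw [if_pos h3, show m = 3 by omega]
    rfl
  rw [if_neg h3]
  have n3 := hno 3 (Bool.eq_false_iff.mpr h3)
  by_cases h4 : ls.any (fun s => pvIdxSpec s == 4)
  · have := hwit 4 h4
    rw [if_pos h4, show m = 4 by omega]
    rfl
  rw [if_neg h4]
  have n4 := hno 4 (Bool.eq_false_iff.mpr h4)
  by_cases h5 : ls.any (fun s => pvIdxSpec s == 5)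
  · have := hwit 5 h5
    rw [if_pos h5, show m = 5 by omega]
    rfl
  rw [if_neg h5]
  have n5 := hno 5 (Bool.eq_false_iff.mpr h5)
  by_cases h6 : ls.any (fun s => pvIdxSpec s == 6)
  · have := hwit 6 h6
    rw [if_pos h6, show m = 6 by omega]
    rfl
  rw [if_neg h6]
  have n6 := hno 6 (Bool.eq_false_iff.mpr h6)
  by_cases h7 : ls.any (fun s => pvIdxSpec s == 7)
  · have := hwit 7 h7
    rw [if_pos h7, show m = 7 by omega]
    rfl
  rw [if_neg h7]
  have n7 := hno 7 (Bool.eq_false_iff.mpr h7)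
  rw [show m = 8 by omega]
  rfl

-- per-device: A's detection = B's detection
set_option maxHeartbeats 1000000 in
lemma pv_detect_eq (name : String) : detect_gpu_vendor_name name = pvBestVendor name := by
  unfold detect_gpu_vendor_name pvBestVendor
  dsimp only
  have hok : ∀ vp ∈ pvVendorPatterns, ∀ q ∈ vp.2, q.toList ≠ [] ∧ ' ' ∉ q.toList := by decide
  rw [pv_findSome?_congr pvVendorPatterns _
      (fun vp => if vp.2.any (fun q => ((PySem.Str.split₀ name).map PySem.Str.lower).contains q) then some vp.1 else none)
      (fun vp hvp => by
        rw [pv_any_mem_congr vp.2 _ _ (fun q hq =>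
          pv_isIn_token q ((hok vp hvp) q hq).1 ((hok vp hvp) q hq).2 name)])]
  rw [pv_chainA]
  rw [show ((PySem.Dict.size pvVendorPriority : Int), (none : Option String)) = ((8 : Int), pvVendAt 8) from by decide]
  rw [← List.foldl_map]
  rw [pv_fold_best _ 8 (by omega) (by omega)]
  exact (pv_min_chain _).symm

-- the outer dedupe loops: list + seen-set accumulation = plain 'not in list' accumulation
lemma pv_outer (f : List (String × String) → Option String)
    (l : List (List (String × String))) (acc : List String) :
    (l.foldl (fun (st : List String × PySem.Set String) device =>
        match f device with
        | some v => if v ≠ "" ∧ PySem.Set.contains st.2 v = false then (st.1 ++ [v], PySem.Set.add st.2 v) else st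
        | none => st) (acc, acc)).1
    = l.foldl (fun (out : List String) device =>
        match f device with
        | some v => if v ≠ "" ∧ out.contains v = false then out ++ [v] else out
        | none => out) acc := by
  induction l generalizing acc with
  | nil => rfl
  | cons d l' ih =>
    rw [List.foldl_cons, List.foldl_cons]
    cases hf : f d with
    | none => exact ih acc
    | some v =>
      dsimp only
      have hc : PySem.Set.contains acc v = acc.contains v := by
        simp [PySem.Set.contains]
      by_cases hg : v ≠ "" ∧ acc.contains v = false
      · rw [if_pos (by rw [hc]; exact hg), if_pos hg]
        have hadd : PySem.Set.add acc v = acc ++ [v] := by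
          rw [PySem.Set.add, hc, if_neg (by rw [hg.2]; exact Bool.false_ne_true)]
        rw [hadd]
        exact ih (acc ++ [v])
      · rw [if_neg (by rw [hc]; exact hg), if_neg hg]
        exact ih acc

-- ===== VERDICT (by name: the statement is the Claim_ definition above) =====
set_option maxHeartbeats 1000000 in
theorem build_gpu_vendors_payload_value_spec : Claim_equal_build_gpu_vendors_payload_value := by
  intro devices _
  show build_gpu_vendors_payload_value devices = build_gpu_vendors_payload_value_alt devices
  unfold build_gpu_vendors_payload_value build_gpu_vendors_payload_value_alt
  dsimp only
  rw [show (PySem.Set.empty : PySem.Set String) = ([] : List String) from rfl]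
  rw [pv_outer (fun device => detect_gpu_vendor_name (PySem.Dict.getD (PySem.Dict.mk device) "name" "")) devices []]
  refine congrArg (PySem.Str.join ", ") ?_
  have hf : (fun (out : List String) (device : List (String × String)) =>
      match detect_gpu_vendor_name (PySem.Dict.getD (PySem.Dict.mk device) "name" "") with
      | some v => if v ≠ "" ∧ out.contains v = false then out ++ [v] else out
      | none => out)
      = (fun (out : List String) (device : List (String × String)) =>
      match pvBestVendor (PySem.Dict.getD (PySem.Dict.mk device) "name" "") with
      | some v => if v ≠ "" ∧ out.contains v = false then out ++ [v] else out
      | none => out) := by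
    funext out device
    rw [pv_detect_eq]
  rw [hf]
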